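-- pv_equiv track=rewrite | github.com/nuxeo/nuxeo | nuxeo-distribution/nuxeo-distribution-cap-gatling-tests/scripts/geohash.py | adjacent
-- ===== SOURCE A (Python) =====
-- BASESEQUENCE = '0123456789bcdefghjkmnpqrstuvwxyz'
--
-- def adjacent(geohash, direction):
--   """Return the adjacent geohash for a given direction."""
--   # Based on an MIT licensed implementation by Chris Veness from:
--   #   http://www.movable-type.co.uk/scripts/geohash.html
--   assert direction in 'nsew', "Invalid direction: %s"%direction
--   assert geohash, "Invalid geohash: %s"%geohash
--   neighbor = {
--     'n': [ 'p0r21436x8zb9dcf5h7kjnmqesgutwvy', 'bc01fg45238967deuvhjyznpkmstqrwx' ],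
--     's': [ '14365h7k9dcfesgujnmqp0r2twvyx8zb', '238967debc01fg45kmstqrwxuvhjyznp' ],
--     'e': [ 'bc01fg45238967deuvhjyznpkmstqrwx', 'p0r21436x8zb9dcf5h7kjnmqesgutwvy' ],
--     'w': [ '238967debc01fg45kmstqrwxuvhjyznp', '14365h7k9dcfesgujnmqp0r2twvyx8zb' ]
--   }
--   border = {
--     'n': [ 'prxz',     'bcfguvyz' ],
--     's': [ '028b',     '0145hjnp' ],
--     'e': [ 'bcfguvyz', 'prxz'     ],
--     'w': [ '0145hjnp', '028b'     ]
--   }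
--   last = geohash[-1]
--   parent = geohash[0:-1]
--   t = len(geohash) % 2
--   # Check for edge cases
--   if (last in border[direction][t]) and (parent):
--     parent = adjacent(parent, direction)
--   return parent + BASESEQUENCE[neighbor[direction][t].index(last)]
-- ===== SOURCE B (Python) =====
-- BASESEQUENCE = '0123456789bcdefghjkmnpqrstuvwxyz'
--
-- def adjacent(geohash, direction):
--   """Return the adjacent geohash for a given direction (iterative)."""
--   assert direction in 'nsew', "Invalid direction: %s"%direction
--   assert geohash, "Invalid geohash: %s"%geohash
--   neighbor = {
--     'n': [ 'p0r21436x8zb9dcf5h7kjnmqesgutwvy', 'bc01fg45238967deuvhjyznpkmstqrwx' ],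
--     's': [ '14365h7k9dcfesgujnmqp0r2twvyx8zb', '238967debc01fg45kmstqrwxuvhjyznp' ],
--     'e': [ 'bc01fg45238967deuvhjyznpkmstqrwx', 'p0r21436x8zb9dcf5h7kjnmqesgutwvy' ],
--     'w': [ '238967debc01fg45kmstqrwxuvhjyznp', '14365h7k9dcfesgujnmqp0r2twvyx8zb' ]
--   }
--   border = {
--     'n': [ 'prxz',     'bcfguvyz' ],
--     's': [ '028b',     '0145hjnp' ],
--     'e': [ 'bcfguvyz', 'prxz'     ],
--     'w': [ '0145hjnp', '028b'     ]
--   }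
--   i = len(geohash) - 1
--   acc = []
--   while True:
--     t = (i + 1) % 2
--     c = geohash[i]
--     acc.append(BASESEQUENCE[neighbor[direction][t].index(c)])
--     if c in border[direction][t] and i > 0:
--       i -= 1
--     else:
--       break
--   return geohash[:i] + ''.join(reversed(acc))
-- ===== Notes on version B (the rewrite author's own statement) =====
-- stated objective: alternative
-- what changed: Replaces A's recursion (which slices off the parent string and recurses on it at every border-propagation step) with a single backward index loop over the original string that accumulates the replacement characters and splices them onto the untouched prefix once.
import Mathlib
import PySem

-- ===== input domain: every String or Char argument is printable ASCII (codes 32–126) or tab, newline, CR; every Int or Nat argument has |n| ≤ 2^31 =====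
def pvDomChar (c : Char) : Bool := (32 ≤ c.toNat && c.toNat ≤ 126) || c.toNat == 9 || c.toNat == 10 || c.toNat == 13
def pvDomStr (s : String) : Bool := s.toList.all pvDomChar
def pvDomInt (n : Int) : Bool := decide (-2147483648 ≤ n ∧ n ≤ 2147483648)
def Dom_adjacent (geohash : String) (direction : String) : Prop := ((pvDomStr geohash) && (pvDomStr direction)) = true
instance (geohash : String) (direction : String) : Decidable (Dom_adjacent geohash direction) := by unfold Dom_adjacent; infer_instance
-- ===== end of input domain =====

-- B replaces A's recursion (which re-slices the parent string at every propagation step) by a single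
-- backward index loop accumulating the replacement characters; return value only, no observable mutation.

-- shared table constants (identical literals in both Pythons)
def baseSeq : List Char := "0123456789bcdefghjkmnpqrstuvwxyz".toList

def neighborChars (dir : String) (t : Nat) : List Char :=
  if dir = "n" then (if t = 0 then "p0r21436x8zb9dcf5h7kjnmqesgutwvy".toList else "bc01fg45238967deuvhjyznpkmstqrwx".toList)
  else if dir = "s" then (if t = 0 then "14365h7k9dcfesgujnmqp0r2twvyx8zb".toList else "238967debc01fg45kmstqrwxuvhjyznp".toList)
  else if dir = "e" then (if t = 0 then "bc01fg45238967deuvhjyznpkmstqrwx".toList else "p0r21436x8zb9dcf5h7kjnmqesgutwvy".toList)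
  else if dir = "w" then (if t = 0 then "238967debc01fg45kmstqrwxuvhjyznp".toList else "14365h7k9dcfesgujnmqp0r2twvyx8zb".toList)
  else []

def borderChars (dir : String) (t : Nat) : List Char :=
  if dir = "n" then (if t = 0 then "prxz".toList else "bcfguvyz".toList)
  else if dir = "s" then (if t = 0 then "028b".toList else "0145hjnp".toList)
  else if dir = "e" then (if t = 0 then "bcfguvyz".toList else "prxz".toList)
  else if dir = "w" then (if t = 0 then "0145hjnp".toList else "028b".toList)
  else []

-- ===== PORT A =====
-- A's recursion, on the reversed character list: head = geohash[-1], tail = reversed parent;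
-- t = len(geohash) % 2 is (rest.length + 1) % 2.  `.index`'s ValueError and the asserts/KeyError
-- are excluded by Pre_adjacent (outside it the getD defaults are never the claimed value).
def adjA (dir : String) : List Char → List Char
  | [] => []
  | c :: rest =>
    let t := (rest.length + 1) % 2
    let repl := baseSeq.getD (((PySem.List.index? (neighborChars dir t) c)).getD 0) ' '
    let parent := if (borderChars dir t).contains c && !rest.isEmpty then adjA dir rest
                  else rest.reverse
    parent ++ [repl]

def adjacent (geohash : String) (direction : String) : String :=
  String.mk (adjA direction geohash.toList.reverse)

-- ===== PORT B =====
-- B's while-loop: index i runs from len-1 downward, acc collects the replacement characters in the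
-- order they are produced; on break the result is geohash[:i] + reversed(acc).
def adjBloop (dir : String) (cs : List Char) : Nat → List Char → List Char
  | 0, acc =>
    let t := (0 + 1) % 2
    let c := cs.getD 0 ' '
    let acc' := acc ++ [baseSeq.getD (((PySem.List.index? (neighborChars dir t) c)).getD 0) ' ']
    -- `c in border and i > 0` is False at i = 0: the loop breaks
    cs.take 0 ++ acc'.reverse
  | i + 1, acc =>
    let t := (i + 1 + 1) % 2
    let c := cs.getD (i + 1) ' '
    let acc' := acc ++ [baseSeq.getD (((PySem.List.index? (neighborChars dir t) c)).getD 0) ' ']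
    if (borderChars dir t).contains c then adjBloop dir cs i acc'
    else cs.take (i + 1) ++ acc'.reverse

def adjacent_alt (geohash : String) (direction : String) : String :=
  String.mk (adjBloop direction geohash.toList (geohash.toList.length - 1) [])

-- ===== PRECONDITION & SPEC =====
-- Pre_ = exactly where the Python returns: direction one of n/s/e/w (else assert/KeyError), geohash
-- nonempty (else assert), and every character the propagation reaches occurs in its neighbor table
-- (else .index raises ValueError).  Position j is reached exactly when every later position holds a
-- border character for its level's parity, so this is a closed-form bounded membership condition.
def Pre_adjacent (geohash : String) (direction : String) : Prop :=
  (direction = "n" ∨ direction = "s" ∨ direction = "e" ∨ direction = "w") ∧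
  geohash ≠ "" ∧
  ∀ j, j < geohash.toList.length →
    (∀ m, m < geohash.toList.length → j < m →
      (borderChars direction ((m + 1) % 2)).contains (geohash.toList.getD m ' ') = true) →
    (neighborChars direction ((j + 1) % 2)).contains (geohash.toList.getD j ' ') = true

instance (geohash : String) (direction : String) : Decidable (Pre_adjacent geohash direction) := by
  unfold Pre_adjacent; infer_instance

def pvWitness_adjacent : String × String := ("u", "n")

def Spec_adjacent (geohash : String) (direction : String) (out : String) : Prop := out = adjacent_alt geohash direction
instance (geohash : String) (direction : String) (out : String) : Decidable (Spec_adjacent geohash direction out) := by unfold Spec_adjacent; infer_instance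

-- ===== CLAIM (what is proved, stated in full; the proofs are below) =====
def Claim_equal_adjacent : Prop := ∀ (geohash : String) (direction : String), Dom_adjacent geohash direction → Pre_adjacent geohash direction → Spec_adjacent geohash direction (adjacent geohash direction)

-- ===== LEMMAS AND PROOFS =====

lemma loop_eq (dir : String) (cs : List Char) :
    ∀ (i : Nat) (acc : List Char), i < cs.length →
      adjBloop dir cs i acc = adjA dir ((cs.take (i + 1)).reverse) ++ acc.reverse := by
  intro i
  induction i with
  | zero =>
    intro acc h
    obtain ⟨c, tl, rfl⟩ : ∃ c tl, cs = c :: tl := by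
      cases cs with
      | nil => simp at h
      | cons c tl => exact ⟨c, tl, rfl⟩
    simp [adjBloop, adjA]
  | succ i ih =>
    intro acc h
    have hi : i + 1 < cs.length := h
    have hget : cs.getD (i + 1) ' ' = cs[i + 1] := List.getD_eq_getElem cs ' ' hi
    have htake : cs.take (i + 1 + 1) = cs.take (i + 1) ++ [cs[i + 1]] := by
      rw [List.take_succ]
      simp [List.getElem?_eq_getElem hi]
    have hlen : (cs.take (i + 1)).length = i + 1 := by
      simp [Nat.le_of_lt hi]
    have hne : (cs.take (i + 1)).reverse ≠ [] := by
      intro hnil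
      have := congrArg List.length hnil
      simp [hlen] at this
    rw [adjBloop]
    simp only [hget]
    by_cases hb : (borderChars dir ((i + 1 + 1) % 2)).contains cs[i + 1]
    · rw [if_pos hb, ih _ (Nat.lt_of_succ_lt hi)]
      conv_rhs => rw [adjA.eq_def]
      rw [htake]
      simp only [List.reverse_append, List.reverse_cons, List.reverse_nil, List.nil_append,
        List.cons_append, List.nil_append]
      rw [if_pos]
      · simp [hlen]
      · simp only [List.length_reverse, hlen, hb, Bool.true_and]
        simpa using hne
    · rw [if_neg hb]
      conv_rhs => rw [adjA.eq_def]
      rw [htake]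
      simp only [List.reverse_append, List.reverse_cons, List.reverse_nil, List.nil_append,
        List.cons_append, List.nil_append]
      rw [if_neg]
      · simp [hlen]
      · simp only [List.length_reverse, hlen]
        intro hc
        exact absurd (Bool.and_elim_left hc) hb

lemma toList_ne_nil_of_ne_empty (s : String) (h : s ≠ "") : s.toList ≠ [] := by
  intro hnil
  exact h (String.toList_inj.mp (by simpa using hnil))

-- ===== VERDICT (by name: the statement is the Claim_ definition above) =====
theorem adjacent_spec : Claim_equal_adjacent := by
  intro geohash direction _ hpre
  unfold Spec_adjacent adjacent adjacent_alt
  have hne : geohash.toList ≠ [] := toList_ne_nil_of_ne_empty _ hpre.2.1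
  have hpos : 0 < geohash.toList.length := List.length_pos_iff.mpr hne
  have hlt : geohash.toList.length - 1 < geohash.toList.length := Nat.sub_lt hpos Nat.one_pos
  rw [loop_eq direction geohash.toList _ [] hlt]
  rw [Nat.sub_add_cancel hpos, List.take_length]
  simp
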